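-- pv_equiv track=rewrite | github.com/wolfybauer/bmp_drawer | save_menu.py | format_py
-- ===== SOURCE A (Python) =====
-- def format_py(data:list, width:int, name:str):
--     out_txt = f'{name} = ['
--     sz = len(data)
--     for d in range(sz):
--         if not d % width:
--             out_txt += '\n    '
--         out_txt += str(data[d])
--         if not d == sz-1:
--             out_txt += ', '
--     out_txt += '\n]'
--     return out_txt
-- ===== SOURCE B (Python) =====
-- def format_py(data: list, width: int, name: str):
--     rows = []
--     rest = data
--     while rest:
--         rows.append(rest[:width])
--         rest = rest[width:]
--     row_strs = [', '.join(str(x) for x in row) for row in rows]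
--     body = '' if not row_strs else '\n    ' + ', \n    '.join(row_strs)
--     return f'{name} = [' + body + '\n]'
-- ===== Notes on version B (the rewrite author's own statement) =====
-- stated objective: simpler
-- what changed: Replaces the single modulo-indexed scan that appends characters per index with a two-phase construction: split the data into rows of `width`, format each row with ', '.join, and join the rows with ', \n '.
-- outside the precondition, e.g. on format_py([1, 2], -2, 'x'): A returns 'x = [\n    1, 2\n]', B does not finish within the time limit
import Mathlib
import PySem

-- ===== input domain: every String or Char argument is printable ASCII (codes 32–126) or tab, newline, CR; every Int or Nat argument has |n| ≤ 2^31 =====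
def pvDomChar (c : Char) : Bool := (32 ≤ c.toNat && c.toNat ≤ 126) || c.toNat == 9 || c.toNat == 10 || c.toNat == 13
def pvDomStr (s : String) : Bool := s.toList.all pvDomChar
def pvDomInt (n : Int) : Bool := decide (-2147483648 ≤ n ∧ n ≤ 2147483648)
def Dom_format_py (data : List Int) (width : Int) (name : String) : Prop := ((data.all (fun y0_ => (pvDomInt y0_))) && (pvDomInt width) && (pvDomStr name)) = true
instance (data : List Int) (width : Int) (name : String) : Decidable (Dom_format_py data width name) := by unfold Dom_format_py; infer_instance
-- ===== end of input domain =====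

-- B replaces A's modulo-indexed character-accumulating scan with a group-into-rows-then-join construction (objective: simpler).

-- ===== PORT A =====
-- literal port of A: one pass over range(len(data)); indices are always in range, so the
-- total pyGetD form of data[d] is exact here.
def format_py (data : List Int) (width : Int) (name : String) : String :=
  let sz : Int := (data.length : Int)
  ((PySem.List.pyRange 0 sz 1).foldl
    (fun out_txt d =>
      let out_txt := if PySem.Int.mod d width = 0 then out_txt ++ "\n    " else out_txt
      let out_txt := out_txt ++ PySem.Int.toStr (PySem.List.pyGetD data d 0)
      if d = sz - 1 then out_txt else out_txt ++ ", ")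
    (name ++ " = [")) ++ "\n]"

-- ===== PORT B =====
-- `while rest: rows.append(rest[:width]); rest = rest[width:]` — fuel |data|+1 only makes the
-- loop total in Lean; for width > 0 (the Pre_ domain) the fuel is never exhausted, so this is
-- exactly Source B's loop.
def chunkLoop (fuel : Nat) (rest : List Int) (width : Int) (rows : List (List Int)) : List (List Int) :=
  match fuel with
  | 0 => rows
  | fuel + 1 =>
    if rest = [] then rows
    else chunkLoop fuel (PySem.List.slice rest (some width) none) width
           (rows ++ [PySem.List.slice rest none (some width)])

def format_py_alt (data : List Int) (width : Int) (name : String) : String :=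
  let rows := chunkLoop (data.length + 1) data width []
  let rowStrs := rows.map (fun row => PySem.Str.join ", " (row.map PySem.Int.toStr))
  let body := if rowStrs = [] then "" else "\n    " ++ PySem.Str.join ", \n    " rowStrs
  name ++ " = [" ++ body ++ "\n]"

-- ===== PRECONDITION & SPEC =====
-- Pre_ excludes width ≤ 0 with nonempty data: A raises ZeroDivisionError at width = 0, and
-- for negative width (a degenerate corner where A's grouping by |width| is an accident of
-- Python's sign-of-divisor modulo) B's chunking loop does not terminate.
def Pre_format_py (data : List Int) (width : Int) (name : String) : Prop := 0 < width ∨ data = []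
instance (data : List Int) (width : Int) (name : String) : Decidable (Pre_format_py data width name) := by unfold Pre_format_py; infer_instance

def pvWitness_format_py : List Int × Int × String := ([1, 2, 3], 2, "x")

def Spec_format_py (data : List Int) (width : Int) (name : String) (out : String) : Prop := out = format_py_alt data width name
instance (data : List Int) (width : Int) (name : String) (out : String) : Decidable (Spec_format_py data width name out) := by unfold Spec_format_py; infer_instance

-- ===== CLAIM (what is proved, stated in full; the proofs are below) =====
def Claim_equal_format_py : Prop := ∀ (data : List Int) (width : Int) (name : String), Dom_format_py data width name → Pre_format_py data width name → Spec_format_py data width name (format_py data width name)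

-- ===== LEMMAS AND PROOFS =====

-- proof-side pure chunking: chunksP w l = [l[0:w], l[w:2w], ...]  (structural recursion)
def chunksP (w : Nat) : List Int → List (List Int)
  | [] => []
  | x :: xs => (x :: xs.take (w - 1)) :: chunksP w (xs.drop (w - 1))
  termination_by l => l.length
  decreasing_by simp only [List.length_drop, List.length_cons]; omega

-- element-level rendering of A's loop body from index d on (proof-side)
def bodyA (width sz : Int) (d : Int) : List Int → String
  | [] => ""
  | x :: xs =>
    (if PySem.Int.mod d width = 0 then "\n    " else "") ++ PySem.Int.toStr x ++
      (if d = sz - 1 then "" else ", ") ++ bodyA width sz (d + 1) xs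

lemma chunksP_nil (w : Nat) : chunksP w [] = [] := by
  rw [chunksP.eq_def]

lemma chunksP_cons_eq (w : Nat) (x : Int) (xs : List Int) :
    chunksP w (x :: xs) = (x :: xs.take (w - 1)) :: chunksP w (xs.drop (w - 1)) := by
  rw [chunksP.eq_def]

lemma chunksP_cons (w : Nat) (l : List Int) (hw : 1 ≤ w) (hl : l ≠ []) :
    chunksP w l = l.take w :: chunksP w (l.drop w) := by
  cases l with
  | nil => exact absurd rfl hl
  | cons x xs =>
    rw [chunksP_cons_eq]
    obtain ⟨m, rfl⟩ : ∃ m, w = m + 1 := ⟨w - 1, by omega⟩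
    simp

lemma chunksP_ne_nil (w : Nat) (l : List Int) (hl : l ≠ []) : chunksP w l ≠ [] := by
  cases l with
  | nil => exact absurd rfl hl
  | cons x xs => rw [chunksP_cons_eq]; simp

-- chunkLoop with enough fuel IS chunksP (width > 0)
lemma chunkLoop_eq (width : Int) (hw : 0 < width) :
    ∀ (fuel : Nat) (rest : List Int) (rows : List (List Int)), rest.length < fuel →
      chunkLoop fuel rest width rows = rows ++ chunksP width.toNat rest := by
  intro fuel
  induction fuel with
  | zero => intro rest rows h; omega
  | succ n ih =>
    intro rest rows h
    rw [chunkLoop]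
    by_cases hr : rest = []
    · subst hr; simp [chunksP_nil]
    · simp only [if_neg hr]
      rw [PySem.List.slice_from rest (le_of_lt hw), PySem.List.slice_to rest (le_of_lt hw)]
      have hne : rest.length ≠ 0 := fun h0 => hr (List.eq_nil_of_length_eq_zero h0)
      have hdl : (rest.drop width.toNat).length = rest.length - width.toNat := List.length_drop ..
      rw [ih _ _ (by omega)]
      rw [chunksP_cons width.toNat rest (by omega) hr]
      simp

-- A's fold over range(d, sz) renders bodyA of data.drop d
lemma foldA_eq (data : List Int) (width : Int) :
    ∀ (n : Nat) (d : Int) (acc : String), 0 ≤ d → ((data.length : Int) - d).toNat = n →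
      ((PySem.List.pyRange d (data.length : Int) 1).foldl
        (fun out_txt e =>
          let out_txt := if PySem.Int.mod e width = 0 then out_txt ++ "\n    " else out_txt
          let out_txt := out_txt ++ PySem.Int.toStr (PySem.List.pyGetD data e 0)
          if e = (data.length : Int) - 1 then out_txt else out_txt ++ ", ") acc).toList
      = acc.toList ++ (bodyA width (data.length : Int) d (data.drop d.toNat)).toList := by
  intro n
  induction n with
  | zero =>
    intro d acc hd hn
    have hge : (data.length : Int) ≤ d := by omega
    rw [PySem.List.pyRange_one_eq_nil hge]
    have : data.drop d.toNat = [] := List.drop_eq_nil_of_le (by omega)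
    simp [this, bodyA]
  | succ n ih =>
    intro d acc hd hn
    have hlt : d < (data.length : Int) := by omega
    rw [PySem.List.pyRange_one_cons hlt]
    simp only [List.foldl_cons]
    rw [ih (d + 1) _ (by omega) (by omega)]
    have hidx : d.toNat < data.length := by omega
    have hdrop : data.drop d.toNat = data[d.toNat] :: data.drop (d.toNat + 1) :=
      List.drop_eq_getElem_cons hidx
    have hget : PySem.List.pyGetD data d 0 = data[d.toNat] :=
      PySem.List.pyGetD_eq_getElem data 0 hd (by omega)
    have hnext : (d + 1).toNat = d.toNat + 1 := by omega
    rw [hdrop, bodyA, hnext, hget]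
    split_ifs <;> simp [String.toList_append]

-- rendering of a run of NON-chunk-start positions: plain ', '-join plus a trailing ', '
-- unless the run ends at sz
lemma bodyA_tail (width sz : Int) :
    ∀ (xs : List Int) (d : Int), xs ≠ [] →
      (∀ i : Nat, i < xs.length → ¬ (width ∣ (d + i))) → d + xs.length ≤ sz →
      (bodyA width sz d xs).toList
        = PySem.Chars.join (", ".toList) (xs.map fun x => (PySem.Int.toStr x).toList)
            ++ (if d + (xs.length : Int) = sz then ([] : List Char) else (", ".toList)) := by
  intro xs
  induction xs with
  | nil => intro d h; exact absurd rfl h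
  | cons x ys ih =>
    intro d _ hnd hle
    have hmod : ¬ PySem.Int.mod d width = 0 := by
      rw [PySem.Int.mod_eq_zero_iff_dvd]
      simpa using hnd 0 (by simp)
    cases ys with
    | nil =>
      rw [bodyA, bodyA, if_neg hmod]
      simp only [List.map_cons, List.map_nil, PySem.Chars.join_singleton, List.length_cons,
        List.length_nil]
      by_cases h : d = sz - 1
      · rw [if_pos h, if_pos (by push_cast; omega)]
        simp [String.toList_append]
      · rw [if_neg h, if_neg (by push_cast; omega)]
        simp [String.toList_append]
    | cons y zs =>
      rw [bodyA]
      have hcomma : ¬ d = sz - 1 := by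
        simp only [List.length_cons] at hle; push_cast at hle; omega
      have hnd' : ∀ i : Nat, i < (y :: zs).length → ¬ width ∣ (d + 1 + (i : Int)) := by
        intro i hi hdv
        apply hnd (i + 1) (by simpa using Nat.succ_lt_succ hi)
        have heq : d + ((i + 1 : Nat) : Int) = d + 1 + i := by push_cast; ring
        rw [heq]; exact hdv
      have hih := ih (d + 1) (by simp) hnd'
        (by simp only [List.length_cons] at hle ⊢; push_cast at hle ⊢; omega)
      rw [if_neg hmod, if_neg hcomma]
      simp only [String.toList_append, hih, List.map_cons, PySem.Chars.join_cons_cons]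
      by_cases hend : d + 1 + ((y :: zs).length : Int) = sz
      · rw [if_pos hend, if_pos (by simp only [List.length_cons] at hend ⊢; push_cast at hend ⊢; omega)]
        simp [List.append_assoc]
      · rw [if_neg hend, if_neg (by simp only [List.length_cons] at hend ⊢; push_cast at hend ⊢; omega)]
        simp [List.append_assoc]

-- rendering of ONE chunk starting at a chunk-aligned position d
lemma bodyA_chunk (width sz : Int) (hw : 0 < width) (c : List Int) (d : Int)
    (hc : c ≠ []) (hdvd : width ∣ d) (_hd : 0 ≤ d) (hclen : c.length ≤ width.toNat)
    (hle : d + c.length ≤ sz) :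
    (bodyA width sz d c).toList
      = "\n    ".toList ++ PySem.Chars.join (", ".toList) (c.map fun x => (PySem.Int.toStr x).toList)
          ++ (if d + (c.length : Int) = sz then ([] : List Char) else (", ".toList)) := by
  have hwn : (width.toNat : Int) = width := Int.toNat_of_nonneg (le_of_lt hw)
  cases c with
  | nil => exact absurd rfl hc
  | cons x ys =>
    rw [bodyA]
    have hmod : PySem.Int.mod d width = 0 := (PySem.Int.mod_eq_zero_iff_dvd d width).mpr hdvd
    cases ys with
    | nil =>
      rw [bodyA, if_pos hmod]
      simp only [List.map_cons, List.map_nil, PySem.Chars.join_singleton, List.length_cons,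
        List.length_nil]
      by_cases h : d = sz - 1
      · rw [if_pos h, if_pos (by push_cast; omega)]
        simp [String.toList_append]
      · rw [if_neg h, if_neg (by push_cast; omega)]
        simp [String.toList_append]
    | cons y zs =>
      have hcomma : ¬ d = sz - 1 := by
        simp only [List.length_cons] at hle; push_cast at hle; omega
      have hnd' : ∀ i : Nat, i < (y :: zs).length → ¬ width ∣ (d + 1 + (i : Int)) := by
        intro i hi hdv
        have h1 : width ∣ (d + 1 + (i : Int) - d) := dvd_sub hdv hdvd
        have h2 : d + 1 + (i : Int) - d = 1 + i := by ring
        rw [h2] at h1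
        have hub : 1 + (i : Int) < width := by
          simp only [List.length_cons] at hclen hi
          omega
        have := Int.le_of_dvd (by omega) h1
        omega
      have hih := bodyA_tail width sz (y :: zs) (d + 1) (by simp) hnd'
        (by simp only [List.length_cons] at hle ⊢; push_cast at hle ⊢; omega)
      rw [if_pos hmod, if_neg hcomma]
      simp only [String.toList_append, hih, List.map_cons, PySem.Chars.join_cons_cons]
      by_cases hend : d + 1 + ((y :: zs).length : Int) = sz
      · rw [if_pos hend, if_pos (by simp only [List.length_cons] at hend ⊢; push_cast at hend ⊢; omega)]
        simp [List.append_assoc]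
      · rw [if_neg hend, if_neg (by simp only [List.length_cons] at hend ⊢; push_cast at hend ⊢; omega)]
        simp [List.append_assoc]

-- bodyA distributes over list append (positions shift by the first part's length)
lemma bodyA_append (width sz : Int) :
    ∀ (c r : List Int) (d : Int),
      (bodyA width sz d (c ++ r)).toList
        = (bodyA width sz d c).toList ++ (bodyA width sz (d + c.length) r).toList := by
  intro c
  induction c with
  | nil => intro r d; simp [bodyA]
  | cons x ys ih =>
    intro r d
    rw [List.cons_append, bodyA, bodyA]
    simp only [String.toList_append, ih r (d + 1)]
    have : d + 1 + (ys.length : Int) = d + ((x :: ys).length : Int) := by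
      simp only [List.length_cons]; push_cast; ring
    rw [this]
    simp [List.append_assoc]

-- the whole of A's body from a chunk-aligned position = B's '\n    ' + ', \n    '-joined rows
lemma bodyA_eq_rows (width sz : Int) (hw : 0 < width) :
    ∀ (n : Nat) (l : List Int) (d : Int), l.length = n → l ≠ [] →
      width ∣ d → 0 ≤ d → d + l.length = sz →
      (bodyA width sz d l).toList
        = "\n    ".toList ++ PySem.Chars.join (", \n    ".toList)
            ((chunksP width.toNat l).map fun c =>
              PySem.Chars.join (", ".toList) (c.map fun x => (PySem.Int.toStr x).toList)) := by
  have hwn : (width.toNat : Int) = width := Int.toNat_of_nonneg (le_of_lt hw)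
  intro n
  induction n using Nat.strong_induction_on with
  | _ n ih =>
    intro l d hlen hl hdvd hd hsz
    have hw1 : 1 ≤ width.toNat := by omega
    rw [chunksP_cons width.toNat l hw1 hl]
    by_cases hr : l.drop width.toNat = []
    · -- single (last) chunk: l itself
      have hlen_le : l.length ≤ width.toNat := by
        by_contra hgt
        have : (l.drop width.toNat).length = l.length - width.toNat := List.length_drop ..
        have : (l.drop width.toNat).length ≠ 0 := by omega
        exact this (by rw [hr]; rfl)
      have htake : l.take width.toNat = l := List.take_of_length_le hlen_le
      rw [htake, hr, chunksP_nil]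
      simp only [List.map_cons, List.map_nil, PySem.Chars.join_singleton]
      rw [bodyA_chunk width sz hw l d hl hdvd hd hlen_le (by omega)]
      rw [if_pos (by omega)]
      simp
    · -- a full chunk then more rows
      have hlt : width.toNat < l.length := by
        by_contra hle'
        exact hr (List.drop_eq_nil_of_le (by omega))
      have hsplit : l = l.take width.toNat ++ l.drop width.toNat := (List.take_append_drop _ l).symm
      have htlen : (l.take width.toNat).length = width.toNat := by
        rw [List.length_take]; omega
      have hdlen : (l.drop width.toNat).length = l.length - width.toNat := List.length_drop ..
      conv_lhs => rw [hsplit]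
      rw [bodyA_append, htlen]
      rw [bodyA_chunk width sz hw (l.take width.toNat) d
            (by intro h0; rw [h0] at htlen; simp at htlen; omega)
            hdvd hd (le_of_eq htlen) (by rw [htlen]; omega)]
      rw [htlen, if_neg (by omega)]
      rw [ih (l.drop width.toNat).length (by omega) (l.drop width.toNat) (d + width.toNat) rfl hr
            (by exact Dvd.dvd.add hdvd (by rw [hwn])) (by omega)
            (by rw [hdlen]; omega)]
      obtain ⟨c2, rest2, hc2⟩ : ∃ c2 rest2, chunksP width.toNat (l.drop width.toNat) = c2 :: rest2 := by
        cases h : chunksP width.toNat (l.drop width.toNat) with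
        | nil => exact absurd h (chunksP_ne_nil _ _ hr)
        | cons a b => exact ⟨a, b, rfl⟩
      rw [hc2]
      simp only [List.map_cons, PySem.Chars.join_cons_cons]
      have hsep : (", \n    " : String).toList = (", " : String).toList ++ ("\n    " : String).toList := by decide
      rw [hsep]
      simp [List.append_assoc]

-- ===== VERDICT (by name: the statement is the Claim_ definition above) =====
theorem format_py_spec : Claim_equal_format_py := by
  intro data width name _ hpre
  unfold Spec_format_py format_py format_py_alt
  apply String.toList_inj.mp
  by_cases hne : data = []
  · subst hne
    simp only [List.length_nil, Nat.cast_zero, Nat.zero_add]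
    rw [PySem.List.pyRange_one_eq_nil le_rfl, chunkLoop]
    simp [String.toList_append]
  · have hw : 0 < width := hpre.resolve_right hne
    rw [chunkLoop_eq width hw (data.length + 1) data [] (by omega)]
    simp only [List.nil_append]
    rw [String.toList_append]
    rw [foldA_eq data width ((data.length : Int) - 0).toNat 0 (name ++ " = [") le_rfl rfl]
    have hrows : (chunksP width.toNat data).map
        (fun row => PySem.Str.join ", " (row.map PySem.Int.toStr)) ≠ [] := by
      simpa using chunksP_ne_nil width.toNat data hne
    rw [if_neg hrows]
    simp only [Int.toNat_zero, List.drop_zero]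
    rw [bodyA_eq_rows width (data.length : Int) hw data.length data 0 rfl hne
          (dvd_zero width) le_rfl (by omega)]
    simp [String.toList_append, PySem.Str.toList_join, List.map_map, Function.comp_def]
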